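-- pv_equiv track=rewrite | github.com/pypi-data/pypi-mirror-364 | packages/Silicrop/silicrop-1.0.6-py3-none-any.whl/silicrop/processing/meplat.py | find_connected_flat_block
-- ===== SOURCE A (Python) =====
-- def find_connected_flat_block(segments, gap_tolerance=5):
--     """
--     Find the largest connected block of straight segments.
--
--     Args:
--         segments (list): List of tuples representing straight segments.
--         gap_tolerance (int): Maximum gap allowed between consecutive segments.
--
--     Returns:
--         tuple: Start index, end index, and the largest connected block of segments.
--     """
--     if not segments:
--         return None, None, []
--
--     segments = sorted(segments)
--     blocks = []
--     current_block = [segments[0]]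
--
--     for i in range(1, len(segments)):
--         prev_end = current_block[-1][1]
--         curr_start, curr_end = segments[i]
--         if abs(curr_start - prev_end) <= gap_tolerance:
--             current_block.append((curr_start, curr_end))
--         else:
--             blocks.append(current_block)
--             current_block = [segments[i]]
--     blocks.append(current_block)
--
--     def block_length(block):
--         return block[-1][1] - block[0][0]
--
--     largest_block = max(blocks, key=block_length)
--
--     # Expand the largest block by connecting adjacent blocks
--     i = blocks.index(largest_block)
--     start_idx = i
--     end_idx = i
--
--     while start_idx > 0:
--         prev_block = blocks[start_idx - 1]
--         if abs(prev_block[-1][1] - largest_block[0][0]) <= gap_tolerance: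
--             largest_block = prev_block + largest_block
--             start_idx -= 1
--         else:
--             break
--
--     while end_idx < len(blocks) - 1:
--         next_block = blocks[end_idx + 1]
--         if abs(largest_block[-1][1] - next_block[0][0]) <= gap_tolerance:
--             largest_block = largest_block + next_block
--             end_idx += 1
--         else:
--             break
--
--     global_start = largest_block[0][0]
--     global_end = largest_block[-1][1]
--     return global_start, global_end, largest_block
-- ===== SOURCE B (Python) =====
-- def find_connected_flat_block(segments, gap_tolerance=5):
--     """Single pass over the sorted segments tracking the current run and the
--     best run so far (strict > keeps the first longest run, like max)."""
--     if not segments: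
--         return None, None, []
--     segs = sorted(segments)
--     best = None
--     run = [segs[0]]
--     for s in segs[1:]:
--         if abs(s[0] - run[-1][1]) <= gap_tolerance:
--             run.append(s)
--         else:
--             if best is None or run[-1][1] - run[0][0] > best[-1][1] - best[0][0]:
--                 best = run
--             run = [s]
--     if best is None or run[-1][1] - run[0][0] > best[-1][1] - best[0][0]:
--         best = run
--     return best[0][0], best[-1][1], best
-- ===== Notes on version B (the rewrite author's own statement) =====
-- stated objective: simpler
-- what changed: B replaces A's build-all-blocks + max(key) + list.index + two (provably dead) expansion while-loops by a single pass over the sorted list that tracks the current run and the best run so far with a strict > comparison (first longest wins, matching max).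
import Mathlib
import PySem

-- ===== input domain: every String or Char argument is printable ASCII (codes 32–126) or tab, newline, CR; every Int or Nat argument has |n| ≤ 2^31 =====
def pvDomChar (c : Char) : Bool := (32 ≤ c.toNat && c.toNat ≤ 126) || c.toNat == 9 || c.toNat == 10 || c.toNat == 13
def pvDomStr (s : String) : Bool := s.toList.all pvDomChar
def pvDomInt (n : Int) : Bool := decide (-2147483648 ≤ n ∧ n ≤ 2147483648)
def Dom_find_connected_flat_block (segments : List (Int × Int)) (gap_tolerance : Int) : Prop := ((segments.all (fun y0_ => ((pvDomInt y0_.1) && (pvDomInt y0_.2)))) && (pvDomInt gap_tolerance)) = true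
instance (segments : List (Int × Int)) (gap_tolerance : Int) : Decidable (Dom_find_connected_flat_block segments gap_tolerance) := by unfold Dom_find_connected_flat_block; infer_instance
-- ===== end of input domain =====

-- B replaces A's build-all-blocks + max(key) + list.index + two (provably dead) expansion
-- while-loops by a single pass over the sorted list tracking the current run and the best
-- run so far with a strict > comparison; objective: simpler.

-- ===== PORT A =====
-- block[-1][1]  (a block is always nonempty in A, so the default is never used)
def pvLastEnd (b : List (Int × Int)) : Int := (b.getLastD (0, 0)).2
-- block_length(block) = block[-1][1] - block[0][0]
def pvBlockLen (b : List (Int × Int)) : Int := (b.getLastD (0, 0)).2 - (b.headD (0, 0)).1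
-- one iteration of A's for-loop over (blocks, current_block)
def pvStepA (gap : Int) (st : List (List (Int × Int)) × List (Int × Int)) (s : Int × Int) :
    List (List (Int × Int)) × List (Int × Int) :=
  if |s.1 - pvLastEnd st.2| ≤ gap then (st.1, st.2 ++ [s]) else (st.1 ++ [st.2], [s])
-- A's first while-loop: decreasing start_idx, result (largest_block, start_idx)
def pvExpandLeft (gap : Int) (blocks : List (List (Int × Int))) :
    Nat → List (Int × Int) → List (Int × Int) × Nat
  | 0, largest => (largest, 0)
  | k + 1, largest =>
      let prev := blocks.getD k []          -- blocks[start_idx - 1]; index always in range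
      if |pvLastEnd prev - (largest.headD (0, 0)).1| ≤ gap then
        pvExpandLeft gap blocks k (prev ++ largest)
      else (largest, k + 1)
-- A's second while-loop: end_idx increases while < len(blocks) - 1
def pvExpandRight (gap : Int) (blocks : List (List (Int × Int))) (end_idx : Nat)
    (largest : List (Int × Int)) : List (Int × Int) :=
  if _h : end_idx < blocks.length - 1 then
    let next := blocks.getD (end_idx + 1) []   -- blocks[end_idx + 1]; in range
    if |pvLastEnd largest - (next.headD (0, 0)).1| ≤ gap then
      pvExpandRight gap blocks (end_idx + 1) (largest ++ next)
    else largest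
  else largest
termination_by blocks.length - 1 - end_idx

def find_connected_flat_block (segments : List (Int × Int)) (gap_tolerance : Int) :
    Option Int × Option Int × (List (Int × Int)) :=
  match segments with
  | [] => (none, none, [])
  | _ :: _ =>
    match PySem.List.sorted2 segments (fun p => p.1) (fun p => p.2) with
    | [] => (none, none, [])          -- unreachable: sorted of a nonempty list is nonempty
    | s0 :: rest =>
      let st := rest.foldl (pvStepA gap_tolerance) ([], [s0])
      let blocks := st.1 ++ [st.2]    -- blocks.append(current_block)
      match PySem.List.max? blocks pvBlockLen with   -- max(blocks, key=block_length)
      | none => (none, none, [])      -- unreachable: blocks is nonempty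
      | some largest0 =>
        let i := (PySem.List.index? blocks largest0).getD 0   -- blocks.index(largest_block)
        let el := pvExpandLeft gap_tolerance blocks i largest0
        let largest := pvExpandRight gap_tolerance blocks i el.1
        (some (largest.headD (0, 0)).1, some (pvLastEnd largest), largest)

-- ===== PORT B =====
-- 'best is None or run[-1][1]-run[0][0] > best[-1][1]-best[0][0]' folded into one update
def pvBetter (best : Option (List (Int × Int))) (run : List (Int × Int)) :
    Option (List (Int × Int)) :=
  match best with
  | none => some run
  | some b => if pvBlockLen b < pvBlockLen run then some run else some b
-- one iteration of B's for-loop over (best, run)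
def pvStepB (gap : Int) (st : Option (List (Int × Int)) × List (Int × Int)) (s : Int × Int) :
    Option (List (Int × Int)) × List (Int × Int) :=
  if |s.1 - pvLastEnd st.2| ≤ gap then (st.1, st.2 ++ [s]) else (pvBetter st.1 st.2, [s])

def find_connected_flat_block_alt (segments : List (Int × Int)) (gap_tolerance : Int) :
    Option Int × Option Int × (List (Int × Int)) :=
  match segments with
  | [] => (none, none, [])
  | _ :: _ =>
    match PySem.List.sorted2 segments (fun p => p.1) (fun p => p.2) with
    | [] => (none, none, [])          -- unreachable
    | s0 :: rest =>
      let st := rest.foldl (pvStepB gap_tolerance) (none, [s0])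
      match pvBetter st.1 st.2 with   -- the final 'close the last run' test
      | none => (none, none, [])      -- unreachable: pvBetter is always some
      | some best => (some (best.headD (0, 0)).1, some (pvLastEnd best), best)

-- ===== PRECONDITION & SPEC =====
def Spec_find_connected_flat_block (segments : List (Int × Int)) (gap_tolerance : Int) (out : Option Int × Option Int × (List (Int × Int))) : Prop := out = find_connected_flat_block_alt segments gap_tolerance
instance (segments : List (Int × Int)) (gap_tolerance : Int) (out : Option Int × Option Int × (List (Int × Int))) : Decidable (Spec_find_connected_flat_block segments gap_tolerance out) := by unfold Spec_find_connected_flat_block; infer_instance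

-- ===== CLAIM (what is proved, stated in full; the proofs are below) =====
def Claim_equal_find_connected_flat_block : Prop := ∀ (segments : List (Int × Int)) (gap_tolerance : Int), Dom_find_connected_flat_block segments gap_tolerance → Spec_find_connected_flat_block segments gap_tolerance (find_connected_flat_block segments gap_tolerance)

-- ===== LEMMAS AND PROOFS =====

-- closing the current run with pvBetter is one more step of the first-max fold
theorem better_max_append (bs : List (List (Int × Int))) (cur : List (Int × Int)) :
    pvBetter (PySem.List.max? bs pvBlockLen) cur
      = PySem.List.max? (bs ++ [cur]) pvBlockLen := by
  rcases h : PySem.List.max? bs pvBlockLen with _ | m <;>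
    · simp only [PySem.List.max?] at h
      simp only [PySem.List.max?, List.foldl_append, List.foldl_cons, List.foldl_nil, h]
      rfl

-- B's fold carries (first-max of the closed blocks, current run) where A's carries
-- (closed blocks, current run).
theorem stepB_tracks_stepA (gap : Int) (rest : List (Int × Int)) :
    ∀ (bs : List (List (Int × Int))) (cur : List (Int × Int)),
      rest.foldl (pvStepB gap) (PySem.List.max? bs pvBlockLen, cur)
        = (PySem.List.max? (rest.foldl (pvStepA gap) (bs, cur)).1 pvBlockLen,
           (rest.foldl (pvStepA gap) (bs, cur)).2) := by
  induction rest with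
  | nil => intro bs cur; rfl
  | cons s t ih =>
    intro bs cur
    simp only [List.foldl_cons, pvStepA, pvStepB]
    by_cases h : |s.1 - pvLastEnd cur| ≤ gap
    · simp only [h, if_true]
      exact ih bs (cur ++ [s])
    · simp only [h, if_false]
      rw [better_max_append]
      exact ih (bs ++ [cur]) [s]

-- the separation relation between consecutive blocks: the gap test that split them failed
def pvSep (gap : Int) (b c : List (Int × Int)) : Prop :=
  ¬ |(c.headD (0, 0)).1 - pvLastEnd b| ≤ gap

-- invariant of A's for-loop: the closed blocks followed by the current run are
-- pairwise separated, and the current run stays nonempty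
theorem foldA_sep (gap : Int) (rest : List (Int × Int)) :
    ∀ (bs : List (List (Int × Int))) (cur : List (Int × Int)), cur ≠ [] →
      List.IsChain (pvSep gap) (bs ++ [cur]) →
      (rest.foldl (pvStepA gap) (bs, cur)).2 ≠ [] ∧
      List.IsChain (pvSep gap)
        ((rest.foldl (pvStepA gap) (bs, cur)).1 ++ [(rest.foldl (pvStepA gap) (bs, cur)).2]) := by
  induction rest with
  | nil => intro bs cur h1 h2; exact ⟨h1, h2⟩
  | cons s t ih =>
    intro bs cur h1 h2
    simp only [List.foldl_cons, pvStepA]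
    by_cases h : |s.1 - pvLastEnd cur| ≤ gap
    · simp only [h, if_true]
      refine ih bs (cur ++ [s]) (by simp) ?_
      rw [List.isChain_append] at h2 ⊢
      refine ⟨h2.1, List.isChain_singleton _, ?_⟩
      intro x hx y hy
      simp only [List.head?_cons, Option.mem_def, Option.some.injEq] at hy
      subst hy
      have hold := h2.2.2 x hx cur (by simp)
      unfold pvSep at hold ⊢
      cases cur with
      | nil => exact absurd rfl h1
      | cons a t2 => simpa using hold
    · simp only [h, if_false]
      refine ih (bs ++ [cur]) [s] (by simp) ?_
      rw [List.isChain_append]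
      refine ⟨h2, List.isChain_singleton _, ?_⟩
      intro x hx y hy
      simp only [List.head?_cons, Option.mem_def, Option.some.injEq] at hy
      subst hy
      rw [Option.mem_def, List.getLast?_append, List.getLast?_singleton, Option.some_or] at hx
      obtain rfl : cur = x := Option.some.inj hx
      unfold pvSep
      simpa using h

-- A's left expansion loop never fires on a separated block list
theorem expandLeft_noop (gap : Int) (blocks : List (List (Int × Int))) (i : Nat)
    (L : List (Int × Int)) (hi : i < blocks.length) (hL : blocks[i] = L)
    (hc : List.IsChain (pvSep gap) blocks) :
    pvExpandLeft gap blocks i L = (L, i) := by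
  cases i with
  | zero => rfl
  | succ k =>
    have hsep : pvSep gap blocks[k] blocks[k + 1] :=
      List.isChain_iff_getElem.mp hc k (by omega)
    unfold pvSep at hsep
    rw [hL] at hsep
    have hget : blocks.getD k [] = blocks[k] := List.getD_eq_getElem blocks [] (by omega)
    unfold pvExpandLeft
    rw [if_neg (by rw [hget, abs_sub_comm]; exact hsep)]

-- A's right expansion loop never fires on a separated block list
theorem expandRight_noop (gap : Int) (blocks : List (List (Int × Int))) (i : Nat)
    (L : List (Int × Int)) (hi : i < blocks.length) (hL : blocks[i] = L)
    (hc : List.IsChain (pvSep gap) blocks) :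
    pvExpandRight gap blocks i L = L := by
  rw [pvExpandRight]
  by_cases hlt : i < blocks.length - 1
  · have hsep : pvSep gap blocks[i] blocks[i + 1] :=
      List.isChain_iff_getElem.mp hc i (by omega)
    unfold pvSep at hsep
    rw [hL] at hsep
    have hget : blocks.getD (i + 1) [] = blocks[i + 1] :=
      List.getD_eq_getElem blocks [] (by omega)
    rw [dif_pos hlt, hget, if_neg (by rw [abs_sub_comm]; exact hsep)]
  · rw [dif_neg hlt]

-- ===== VERDICT (by name: the statement is the Claim_ definition above) =====
theorem find_connected_flat_block_spec : Claim_equal_find_connected_flat_block := by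
  intro segments gap _dom
  unfold Spec_find_connected_flat_block
  unfold find_connected_flat_block find_connected_flat_block_alt
  cases segments with
  | nil => rfl
  | cons a as =>
    cases hss : PySem.List.sorted2 (a :: as) (fun p => p.1) (fun p => p.2) with
    | nil => rfl          -- both ports return (none, none, []) here
    | cons s0 rest =>
      simp only
      have htrack := stepB_tracks_stepA gap rest [] [s0]
      set stA := rest.foldl (pvStepA gap) ([], [s0]) with hstA
      have hmax0 : PySem.List.max? ([] : List (List (Int × Int))) pvBlockLen = none := rfl
      rw [hmax0] at htrack
      rw [htrack, better_max_append]
      set blocks := stA.1 ++ [stA.2] with hblocks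
      have hbne : blocks ≠ [] := by simp [hblocks]
      cases hm : PySem.List.max? blocks pvBlockLen with
      | none => exact absurd ((PySem.List.max?_eq_none_iff blocks pvBlockLen).mp hm) hbne
      | some L =>
        have hmem : L ∈ blocks := PySem.List.max?_mem hm
        have hidx : (PySem.List.index? blocks L).isSome :=
          (PySem.List.index?_isSome_iff blocks L).mpr hmem
        cases hix : PySem.List.index? blocks L with
        | none => rw [hix] at hidx; exact absurd hidx (by simp)
        | some i =>
          obtain ⟨hilt, hgi, _⟩ := PySem.List.getElem_of_index?_eq_some hix
          have hsep := foldA_sep gap rest [] [s0] (by simp)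
            (by simp)
          rw [← hstA, ← hblocks] at hsep
          have hel := expandLeft_noop gap blocks i L hilt hgi hsep.2
          have her := expandRight_noop gap blocks i L hilt hgi hsep.2
          simp only [hix, Option.getD_some, hel, her]
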